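-- pv_equiv track=rewrite | github.com/jonreymond/hackvisor | backend/app/agents/summarization_agent.py | create_structured_summary
-- ===== SOURCE A (Python) =====
-- def create_structured_summary(
--
--     behavioural_bias_summary,
--     data_quality_check,
--     product_portfolio_check,
--     financial_advises,
--     meeting_notes,
-- ):
--     """
--     Create a structured markdown summary with two sections:
--     1. Meeting Notes
--     2. Advisor Suggestions (including behavioral biases, data quality, product portfolio, and financial advice)
--
--     Args:
--         behavioural_bias_summary (list): List of identified behavioral biases
--         data_quality_check (list): List of data quality findings
--         product_portfolio_check (list): List of product portfolio findings
--         financial_advises (list): List of financial advisor recommendations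
--         meeting_notes (dict): Dictionary containing meeting notes and action items
--
--     Returns:
--         str: Formatted markdown summary
--     """
--     # Format meeting notes section
--     meeting_notes_section = "# Meeting Notes\n\n"
--
--     # Add meeting notes if available
--     if meeting_notes and "meeting_notes" in meeting_notes:
--         meeting_notes_section += meeting_notes["meeting_notes"] + "\n\n"
--
--     # Add action items if available
--     if meeting_notes and "action_items" in meeting_notes:
--         meeting_notes_section += (
--             "## Action Items\n\n" + meeting_notes["action_items"] + "\n\n"
--         )
--
--     # Format advisor suggestions section
--     advisor_suggestions_section = "# Advisor Suggestions\n\n"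
--
--     # Add behavioral biases if available
--     if behavioural_bias_summary:
--         advisor_suggestions_section += "## Behavioral Biases\n\n"
--         for bias in behavioural_bias_summary:
--             advisor_suggestions_section += bias + "\n"
--         advisor_suggestions_section += "\n"
--
--     # Add data quality findings if available
--     if data_quality_check:
--         advisor_suggestions_section += "## Data Quality\n\n"
--         for finding in data_quality_check:
--             advisor_suggestions_section += finding + "\n"
--         advisor_suggestions_section += "\n"
--
--     # Add product portfolio findings if available
--     if product_portfolio_check:
--         advisor_suggestions_section += "## Product Portfolio\n\n"
--         for finding in product_portfolio_check:
--             advisor_suggestions_section += finding + "\n"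
--         advisor_suggestions_section += "\n"
--
--     # Add financial advisor recommendations if available
--     if financial_advises:
--         advisor_suggestions_section += "## Financial Recommendations\n\n"
--         for recommendation in financial_advises:
--             advisor_suggestions_section += recommendation + "\n"
--         advisor_suggestions_section += "\n"
--
--     # Combine both sections
--     markdown_summary = meeting_notes_section + advisor_suggestions_section
--
--     return markdown_summary
-- ===== SOURCE B (Python) =====
-- def create_structured_summary(
--     behavioural_bias_summary,
--     data_quality_check,
--     product_portfolio_check,
--     financial_advises,
--     meeting_notes,
-- ):
--     """Line-oriented rewrite: emit the document as a stream of line chunks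
--     from a generator and join them once with '\n' (one trailing newline)."""
--
--     def emit_lines():
--         yield "# Meeting Notes"
--         yield ""
--         if meeting_notes and "meeting_notes" in meeting_notes:
--             yield meeting_notes["meeting_notes"]
--             yield ""
--         if meeting_notes and "action_items" in meeting_notes:
--             yield "## Action Items"
--             yield ""
--             yield meeting_notes["action_items"]
--             yield ""
--         yield "# Advisor Suggestions"
--         yield ""
--         for header, items in (
--             ("## Behavioral Biases", behavioural_bias_summary),
--             ("## Data Quality", data_quality_check),
--             ("## Product Portfolio", product_portfolio_check),
--             ("## Financial Recommendations", financial_advises),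
--         ):
--             if items:
--                 yield header
--                 yield ""
--                 yield from items
--                 yield ""
--
--     return "\n".join(emit_lines()) + "\n"
-- ===== Notes on version B (the rewrite author's own statement) =====
-- stated objective: alternative
-- what changed: B builds the document as a flat stream of line chunks from a generator (separators between lines, one trailing newline added once via '\n'.join(...)+'\n') instead of A's concatenation of pre-formatted blocks that each carry their own embedded/trailing newlines.
import Mathlib
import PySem

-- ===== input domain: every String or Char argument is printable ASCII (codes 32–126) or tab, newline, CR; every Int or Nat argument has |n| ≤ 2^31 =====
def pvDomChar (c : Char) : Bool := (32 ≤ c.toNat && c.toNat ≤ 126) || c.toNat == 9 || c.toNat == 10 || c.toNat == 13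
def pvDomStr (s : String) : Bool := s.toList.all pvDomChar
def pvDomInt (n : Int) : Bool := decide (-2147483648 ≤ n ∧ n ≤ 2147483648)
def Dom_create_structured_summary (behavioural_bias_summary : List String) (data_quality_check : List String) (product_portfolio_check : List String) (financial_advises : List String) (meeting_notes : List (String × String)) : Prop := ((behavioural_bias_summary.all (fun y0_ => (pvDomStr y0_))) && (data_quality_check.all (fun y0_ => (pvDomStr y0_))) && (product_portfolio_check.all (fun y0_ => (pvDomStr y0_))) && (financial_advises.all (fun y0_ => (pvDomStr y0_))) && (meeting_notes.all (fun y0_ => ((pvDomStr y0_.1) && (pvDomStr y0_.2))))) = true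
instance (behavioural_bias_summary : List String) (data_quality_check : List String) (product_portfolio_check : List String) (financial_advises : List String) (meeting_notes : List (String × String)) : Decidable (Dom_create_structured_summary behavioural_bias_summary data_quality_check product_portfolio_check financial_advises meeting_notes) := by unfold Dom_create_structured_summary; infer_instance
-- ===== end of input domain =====

-- ===== PORT A =====
-- B emits the document as a flat stream of line chunks joined once with '\n'; return values are identical.
def create_structured_summary (behavioural_bias_summary : List String) (data_quality_check : List String) (product_portfolio_check : List String) (financial_advises : List String) (meeting_notes : List (String × String)) : String :=
  -- dict lookup 'k in d' / 'd[k]' via List.lookup (first match, as the association-list convention requires)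
  let meeting_notes_section := "# Meeting Notes\n\n"
  let meeting_notes_section :=
    if !meeting_notes.isEmpty && (meeting_notes.lookup "meeting_notes").isSome then
      meeting_notes_section ++ ((meeting_notes.lookup "meeting_notes").getD "") ++ "\n\n"
    else meeting_notes_section
  let meeting_notes_section :=
    if !meeting_notes.isEmpty && (meeting_notes.lookup "action_items").isSome then
      meeting_notes_section ++ ("## Action Items\n\n" ++ ((meeting_notes.lookup "action_items").getD "") ++ "\n\n")
    else meeting_notes_section
  let advisor_suggestions_section := "# Advisor Suggestions\n\n"
  let advisor_suggestions_section :=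
    if !behavioural_bias_summary.isEmpty then
      (behavioural_bias_summary.foldl (fun acc bias => acc ++ bias ++ "\n")
        (advisor_suggestions_section ++ "## Behavioral Biases\n\n")) ++ "\n"
    else advisor_suggestions_section
  let advisor_suggestions_section :=
    if !data_quality_check.isEmpty then
      (data_quality_check.foldl (fun acc finding => acc ++ finding ++ "\n")
        (advisor_suggestions_section ++ "## Data Quality\n\n")) ++ "\n"
    else advisor_suggestions_section
  let advisor_suggestions_section :=
    if !product_portfolio_check.isEmpty then
      (product_portfolio_check.foldl (fun acc finding => acc ++ finding ++ "\n")
        (advisor_suggestions_section ++ "## Product Portfolio\n\n")) ++ "\n"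
    else advisor_suggestions_section
  let advisor_suggestions_section :=
    if !financial_advises.isEmpty then
      (financial_advises.foldl (fun acc recommendation => acc ++ recommendation ++ "\n")
        (advisor_suggestions_section ++ "## Financial Recommendations\n\n")) ++ "\n"
    else advisor_suggestions_section
  meeting_notes_section ++ advisor_suggestions_section

-- ===== PORT B =====
-- the line chunks one (header, items) table entry contributes to the stream (none when the list is empty)
def csLinesSection (entry : String × List String) : List String :=
  if entry.2.isEmpty then [] else [entry.1, ""] ++ entry.2 ++ [""]

def create_structured_summary_alt (behavioural_bias_summary : List String) (data_quality_check : List String) (product_portfolio_check : List String) (financial_advises : List String) (meeting_notes : List (String × String)) : String :=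
  -- the generator's line stream, in yield order
  let lines : List String :=
    ["# Meeting Notes", ""]
    ++ (if !meeting_notes.isEmpty && (meeting_notes.lookup "meeting_notes").isSome then
          [(meeting_notes.lookup "meeting_notes").getD "", ""] else [])
    ++ (if !meeting_notes.isEmpty && (meeting_notes.lookup "action_items").isSome then
          ["## Action Items", "", (meeting_notes.lookup "action_items").getD "", ""] else [])
    ++ ["# Advisor Suggestions", ""]
    ++ ([("## Behavioral Biases", behavioural_bias_summary),
         ("## Data Quality", data_quality_check),
         ("## Product Portfolio", product_portfolio_check),
         ("## Financial Recommendations", financial_advises)].flatMap csLinesSection)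
  PySem.Str.join "\n" lines ++ "\n"

-- ===== PRECONDITION & SPEC =====
def Spec_create_structured_summary (behavioural_bias_summary : List String) (data_quality_check : List String) (product_portfolio_check : List String) (financial_advises : List String) (meeting_notes : List (String × String)) (out : String) : Prop := out = create_structured_summary_alt behavioural_bias_summary data_quality_check product_portfolio_check financial_advises meeting_notes
instance (behavioural_bias_summary : List String) (data_quality_check : List String) (product_portfolio_check : List String) (financial_advises : List String) (meeting_notes : List (String × String)) (out : String) : Decidable (Spec_create_structured_summary behavioural_bias_summary data_quality_check product_portfolio_check financial_advises meeting_notes out) := by unfold Spec_create_structured_summary; infer_instance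

-- ===== CLAIM (what is proved, stated in full; the proofs are below) =====
def Claim_equal_create_structured_summary : Prop := ∀ (behavioural_bias_summary : List String) (data_quality_check : List String) (product_portfolio_check : List String) (financial_advises : List String) (meeting_notes : List (String × String)), Dom_create_structured_summary behavioural_bias_summary data_quality_check product_portfolio_check financial_advises meeting_notes → Spec_create_structured_summary behavioural_bias_summary data_quality_check product_portfolio_check financial_advises meeting_notes (create_structured_summary behavioural_bias_summary data_quality_check product_portfolio_check financial_advises meeting_notes)

-- ===== LEMMAS AND PROOFS =====
-- proof-side semantics of a line stream: each chunk followed by one '\n'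
def pvEmit (L : List String) : String := L.foldr (fun l acc => l ++ ("\n" ++ acc)) ""

theorem pvEmit_append (a b : List String) : pvEmit (a ++ b) = pvEmit a ++ pvEmit b := by
  induction a with
  | nil => apply String.toList_inj.mp; simp [pvEmit]
  | cons x xs ih =>
    simp only [pvEmit, List.foldr_cons, List.cons_append] at ih ⊢
    rw [ih]
    apply String.toList_inj.mp
    simp

-- joining a nonempty line stream with '\n' and adding one final '\n' = emitting each line with its '\n'
theorem pvJoin_emit (L : List String) (h : L ≠ []) :
    PySem.Str.join "\n" L ++ "\n" = pvEmit L := by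
  induction L with
  | nil => exact absurd rfl h
  | cons x xs ih =>
    cases xs with
    | nil =>
      apply String.toList_inj.mp
      simp [pvEmit, PySem.Str.toList_join, PySem.Chars.join_singleton]
    | cons y ys =>
      have h2 := ih (by simp)
      calc PySem.Str.join "\n" (x :: y :: ys) ++ "\n"
          = x ++ "\n" ++ (PySem.Str.join "\n" (y :: ys) ++ "\n") := by
            apply String.toList_inj.mp
            simp [PySem.Str.toList_join, PySem.Chars.join_cons_cons]
        _ = x ++ "\n" ++ pvEmit (y :: ys) := by rw [h2]
        _ = pvEmit (x :: y :: ys) := by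
            apply String.toList_inj.mp; simp [pvEmit]

-- A's per-item append loop = emitting the items as lines
theorem pvFoldl_emit (items : List String) (acc : String) :
    items.foldl (fun a s => a ++ s ++ "\n") acc = acc ++ pvEmit items := by
  induction items generalizing acc with
  | nil => apply String.toList_inj.mp; simp [pvEmit]
  | cons x xs ih =>
    rw [List.foldl_cons, ih]
    apply String.toList_inj.mp
    simp [pvEmit]

-- one advisor branch of A = appending the emission of B's line chunks for that (header, items) entry
theorem csBlock (acc hA hB : String) (items : List String) (hh : hA = hB ++ "\n\n") :
    (if !items.isEmpty then (items.foldl (fun a s => a ++ s ++ "\n") (acc ++ hA)) ++ "\n" else acc)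
    = acc ++ pvEmit (csLinesSection (hB, items)) := by
  cases items with
  | nil =>
    apply String.toList_inj.mp
    simp [csLinesSection, pvEmit]
  | cons x xs =>
    rw [if_pos (by simp), pvFoldl_emit, hh, csLinesSection]
    simp only [List.isEmpty_cons, Bool.false_eq_true, if_false]
    rw [pvEmit_append, pvEmit_append]
    apply String.toList_inj.mp
    simp [pvEmit]

theorem csLookup_ne_nil {d : List (String × String)} {k : String}
    (h : (d.lookup k).isSome) : d ≠ [] := by
  cases d with
  | nil => simp [List.lookup] at h
  | cons a l => simp

-- ===== VERDICT (by name: the statement is the Claim_ definition above) =====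
theorem create_structured_summary_spec : Claim_equal_create_structured_summary := by
  intro bbs dqc ppc fa mn _
  unfold Spec_create_structured_summary create_structured_summary create_structured_summary_alt
  dsimp only
  rw [csBlock _ _ "## Financial Recommendations" _ (by decide),
      csBlock _ _ "## Product Portfolio" _ (by decide),
      csBlock _ _ "## Data Quality" _ (by decide),
      csBlock _ _ "## Behavioral Biases" _ (by decide)]
  rw [pvJoin_emit _ (by simp)]
  simp only [List.flatMap_cons, List.flatMap_nil, List.append_nil]
  rcases hm : mn.lookup "meeting_notes" with _ | v1 <;>
    rcases ha : mn.lookup "action_items" with _ | v2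
  · simp only [Option.isSome_none, Bool.and_false, Bool.false_eq_true, if_false, pvEmit_append]
    apply String.toList_inj.mp
    simp [pvEmit]
  · have h2 : (!mn.isEmpty) = true := by
      simp only [Bool.not_eq_true', List.isEmpty_eq_false_iff]
      exact csLookup_ne_nil (by rw [ha]; rfl)
    simp only [h2, Option.isSome_none, Option.isSome_some, Bool.and_false,
      Bool.and_true, Bool.false_eq_true, if_false, if_true, pvEmit_append]
    apply String.toList_inj.mp
    simp [pvEmit]
  · have h1 : (!mn.isEmpty) = true := by
      simp only [Bool.not_eq_true', List.isEmpty_eq_false_iff]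
      exact csLookup_ne_nil (by rw [hm]; rfl)
    simp only [h1, Option.isSome_none, Option.isSome_some, Bool.and_false,
      Bool.and_true, Bool.false_eq_true, if_false, if_true, pvEmit_append]
    apply String.toList_inj.mp
    simp [pvEmit]
  · have h1 : (!mn.isEmpty) = true := by
      simp only [Bool.not_eq_true', List.isEmpty_eq_false_iff]
      exact csLookup_ne_nil (by rw [hm]; rfl)
    simp only [h1, Option.isSome_some, Bool.and_true, if_true, pvEmit_append]
    apply String.toList_inj.mp
    simp [pvEmit]
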